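-- pv_equiv track=rewrite | github.com/chesterharvey/StreetSpace | streetspace/network.py | classify_turn_proximity
-- ===== SOURCE A (Python) =====
-- def classify_turn_proximity(turn_directions):
--     """Classify turn proximity based on a list of turn directions
--     """
--     # Enumerate turns
--     enum_turns = list(enumerate(turn_directions))
--     # Identify U-turns; these are always near
--     u_turns = {i: 'near' for i, x in enum_turns if x == 'U'}
--     # Remove U-turns
--     enum_turns = [(i, x) for i, x in enum_turns if x != 'U']
--     # First and last turns are 'near', all others are 'far
--     turn_proximity = ['far'] * len(enum_turns)
--     if len(turn_proximity) > 0: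
--         turn_proximity[0] = 'near'
--         turn_proximity[-1] = 'near'
--         # Enumerate proximities
--         enum_proximity = [(i, x) for (i, _), x in zip(enum_turns, turn_proximity)]
--         # Convert into dictionary
--         enum_proximity = dict(enum_proximity)
--     else:
--         enum_proximity = {}
--     # Combine non-U-turns and U-turns
--     turn_proximities = {**enum_proximity, **u_turns}
--     # List proximities in order
--     turn_proximities = [turn_proximities[key] for key in sorted(turn_proximities.keys())]
--     return turn_proximities
-- ===== SOURCE B (Python) =====
-- def classify_turn_proximity(turn_directions):
--     """Classify turn proximity based on a list of turn directions
--     """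
--     # One pass: find the first and last non-U-turn indices.
--     first = last = None
--     for i, x in enumerate(turn_directions):
--         if x != 'U':
--             if first is None:
--                 first = i
--             last = i
--     # Build the output directly: U-turns and the boundary non-U turns are near.
--     return ['near' if x == 'U' or i == first or i == last else 'far'
--             for i, x in enumerate(turn_directions)]
-- ===== Notes on version B (the rewrite author's own statement) =====
-- stated objective: faster
-- what changed: Replaces the enumerate/filter/two-dicts/merge/sort-keys pipeline by a single pass that records the first and last non-U indices and then emits each label directly, with no dictionaries and no sort.
import Mathlib
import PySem

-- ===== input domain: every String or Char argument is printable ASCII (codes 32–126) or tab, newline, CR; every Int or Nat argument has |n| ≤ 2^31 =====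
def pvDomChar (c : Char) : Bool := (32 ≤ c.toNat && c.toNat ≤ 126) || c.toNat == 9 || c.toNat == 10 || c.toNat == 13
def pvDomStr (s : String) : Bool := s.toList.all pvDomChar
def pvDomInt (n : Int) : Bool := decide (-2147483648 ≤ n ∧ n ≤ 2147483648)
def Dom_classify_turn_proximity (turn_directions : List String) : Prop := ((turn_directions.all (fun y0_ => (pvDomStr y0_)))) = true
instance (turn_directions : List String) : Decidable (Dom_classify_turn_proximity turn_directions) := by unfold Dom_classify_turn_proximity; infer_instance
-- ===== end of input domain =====

-- B replaces A's filter/two-dicts/merge/sort-keys pipeline by a single pass recording the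
-- first and last non-'U' indices and emitting each label directly (measured faster at scale).

-- ===== PORT A =====
def classify_turn_proximity (turn_directions : List String) : List String :=
  let enum_turns := PySem.List.enumerate turn_directions 0
  -- u_turns = {i: 'near' for i, x in enum_turns if x == 'U'}
  let u_turns : PySem.Dict Int String :=
    enum_turns.foldl (fun d p => if p.2 == "U" then d.insert p.1 "near" else d) PySem.Dict.empty
  -- enum_turns = [(i, x) for i, x in enum_turns if x != 'U']
  let enum_turns2 := enum_turns.filter (fun p => p.2 != "U")
  let turn_proximity := List.replicate enum_turns2.length "far"
  let enum_proximity : PySem.Dict Int String :=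
    if turn_proximity.length > 0 then
      let tp1 := PySem.List.pySetD turn_proximity 0 "near"
      let tp2 := PySem.List.pySetD tp1 (-1) "near"
      PySem.Dict.ofList ((enum_turns2.zip tp2).map (fun q => (q.1.1, q.2)))
    else PySem.Dict.empty
  -- turn_proximities = {**enum_proximity, **u_turns}
  let turn_proximities := enum_proximity.update u_turns.items
  -- every key iterated over is a key of the dict, so Python's turn_proximities[key] never
  -- raises KeyError; getD with a dummy default is exact here
  (PySem.List.sorted turn_proximities.keys (fun k => k)).map (fun k => turn_proximities.getD k "")

-- ===== PORT B =====
def classify_turn_proximity_alt (turn_directions : List String) : List String :=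
  let fl := (PySem.List.enumerate turn_directions 0).foldl
      (fun (s : Option Int × Option Int) p =>
        if p.2 != "U" then ((if s.1 = none then some p.1 else s.1), some p.1) else s)
      (none, none)
  (PySem.List.enumerate turn_directions 0).map (fun p =>
    if p.2 == "U" || fl.1 == some p.1 || fl.2 == some p.1 then "near" else "far")

-- ===== PRECONDITION & SPEC =====
def Spec_classify_turn_proximity (turn_directions : List String) (out : List String) : Prop := out = classify_turn_proximity_alt turn_directions
instance (turn_directions : List String) (out : List String) : Decidable (Spec_classify_turn_proximity turn_directions out) := by unfold Spec_classify_turn_proximity; infer_instance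

-- ===== CLAIM (what is proved, stated in full; the proofs are below) =====
def Claim_equal_classify_turn_proximity : Prop := ∀ (turn_directions : List String), Dom_classify_turn_proximity turn_directions → Spec_classify_turn_proximity turn_directions (classify_turn_proximity turn_directions)

-- ===== LEMMAS AND PROOFS =====

-- A's merged dictionary (the whole let-chain of port A), named for the proofs below
def pvM (e : List (Int × String)) : PySem.Dict Int String :=
  (if (List.replicate (e.filter (fun p => p.2 != "U")).length "far").length > 0 then
      PySem.Dict.ofList (((e.filter (fun p => p.2 != "U")).zip
        (PySem.List.pySetD (PySem.List.pySetD
          (List.replicate (e.filter (fun p => p.2 != "U")).length "far") 0 "near")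
          (-1) "near")).map (fun q => (q.1.1, q.2)))
    else PySem.Dict.empty).update
    (e.foldl (fun d p => if p.2 == "U" then d.insert p.1 "near" else d) PySem.Dict.empty).items

-- B's first/last scan, named for the proofs below
def pvF (e : List (Int × String)) : Option Int × Option Int :=
  e.foldl (fun (s : Option Int × Option Int) p =>
    if p.2 != "U" then ((if s.1 = none then some p.1 else s.1), some p.1) else s) (none, none)

-- B's scan characterised on an arbitrary pair list
theorem foldl_firstlast (zs : List (Int × String)) (a b : Option Int) :
    zs.foldl (fun (s : Option Int × Option Int) p =>
        ((if s.1 = none then some p.1 else s.1), some p.1)) (a, b)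
      = (a.or (zs.head?.map (·.1)), (zs.getLast?.map (·.1)).or b) := by
  induction zs generalizing a b with
  | nil => simp
  | cons z zs ih =>
    rw [List.foldl_cons, ih]
    cases zs with
    | nil => cases a <;> simp
    | cons c cs =>
      obtain ⟨y, hy⟩ := Option.isSome_iff_exists.mp
        (List.getLast?_isSome.mpr (by simp) : (c :: cs).getLast?.isSome)
      cases a <;> simp [List.getLast?_cons_cons, hy, Option.or]

-- pySetD with index -1 on a nonempty list sets the last element
theorem pySetD_neg_one {α : Type} (xs : List α) (v : α) (h : xs ≠ []) :
    PySem.List.pySetD xs (-1) v = xs.set (xs.length - 1) v := by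
  have hl : 1 ≤ (xs.length : Int) := by exact_mod_cast List.length_pos_iff.mpr h
  have h2 : -(xs.length:Int) ≤ -1 := by omega
  simp [PySem.List.pySetD, PySem.List.pySet?, PySem.List.pyIdx?, h2]

theorem classify_core (e : List (Int × String))
    (hpe : e.Pairwise (fun p q => p.1 < q.1)) :
    (PySem.List.sorted (pvM e).keys (fun k => k)).map (fun k => (pvM e).getD k "")
      = e.map (fun p =>
          if (p.2 == "U" || (pvF e).1 == some p.1 || (pvF e).2 == some p.1) then "near" else "far") := by
  unfold pvM pvF
  have hnde : (e.map (·.1)).Nodup :=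
    List.Pairwise.map _ (fun a b h => ne_of_lt h) hpe
  have hplt : (e.map (·.1)).Pairwise (· < ·) :=
    List.Pairwise.map _ (fun a b h => h) hpe
  set e2 := e.filter (fun p => p.2 != "U") with he2
  set eU := e.filter (fun p => p.2 == "U") with heU
  set uD := e.foldl (fun d p => if p.2 == "U" then d.insert p.1 "near" else d)
      PySem.Dict.empty with huD
  set F := e.foldl (fun (s : Option Int × Option Int) p =>
      if p.2 != "U" then ((if s.1 = none then some p.1 else s.1), some p.1) else s)
      (none, none) with hFdef
  have hndU : (eU.map (·.1)).Nodup :=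
    hnde.sublist (List.Sublist.map _ List.filter_sublist)
  have hnd2 : (e2.map (·.1)).Nodup :=
    hnde.sublist (List.Sublist.map _ List.filter_sublist)
  have hp2 : e2.Pairwise (fun p q => p.1 < q.1) := List.Pairwise.filter _ hpe
  have hemp : PySem.Dict.empty.items = ([] : List (Int × String)) := rfl
  -- u_turns characterisation
  have hu : uD.items = eU.map (fun p => (p.1, "near")) := by
    have h1 := PySem.List.foldl_if_eq_foldl_filter (fun p : Int × String => p.2 == "U")
      (fun d p => d.insert p.1 "near") e PySem.Dict.empty
    simp only [] at h1
    rw [huD, h1, ← heU]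
    have h2 := PySem.Dict.items_foldl_insert_fresh eU (fun p => p.1) (fun _ => "near")
      PySem.Dict.empty (fun a _ => PySem.Dict.contains_empty a.1) hndU
    simp only [] at h2
    rw [h2, hemp]
    simp
  have huK : uD.items.map (·.1) = eU.map (·.1) := by
    rw [hu, List.map_map]; rfl
  have hfreshU : ∀ a ∈ uD.items, ∀ q ∈ e2, q.1 ≠ a.1 := by
    intro a ha q hq
    rw [hu] at ha
    obtain ⟨p, hpmem, rfl⟩ := List.mem_map.mp ha
    intro hqp
    have hqe : q ∈ e := List.mem_of_mem_filter hq
    have hpe' : p ∈ e := List.mem_of_mem_filter hpmem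
    have : q = p := List.inj_on_of_nodup_map hnde hqe hpe' hqp
    subst this
    have h1 : (q.2 == "U") = true := (List.mem_filter.mp hpmem).2
    have h2 : (q.2 != "U") = true := (List.mem_filter.mp hq).2
    simp [bne, h1] at h2
  -- B's fold
  have hfl : F = (e2.head?.map (·.1), e2.getLast?.map (·.1)) := by
    have h1 := PySem.List.foldl_if_eq_foldl_filter (fun p : Int × String => p.2 != "U")
      (fun (s : Option Int × Option Int) p =>
        ((if s.1 = none then some p.1 else s.1), some p.1)) e (none, none)
    simp only [] at h1
    rw [hFdef, h1, ← he2, foldl_firstlast]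
    simp
  rw [hfl]
  by_cases hm : e2 = []
  · -- no non-U turn: everything is a U-turn, everything is 'near'
    have hall : ∀ p ∈ e, (p.2 == "U") = true := by
      intro p hp
      by_contra hne
      have hmem : p ∈ e2 := by
        rw [he2]
        exact List.mem_filter.mpr ⟨hp, by simp [bne]; exact fun h => hne (by simp [h])⟩
      simp [hm] at hmem
    have heUe : eU = e := by rw [heU]; exact List.filter_eq_self.mpr hall
    rw [hm]
    rw [if_neg (by simp)]
    have h2 := PySem.Dict.items_foldl_insert_fresh uD.items (fun p => p.1) (fun p => p.2)
      PySem.Dict.empty (fun a _ => PySem.Dict.contains_empty a.1) (huK ▸ hndU)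
    simp only [] at h2
    have hmi : (PySem.Dict.empty.update uD.items).items = uD.items := by
      rw [PySem.Dict.update, h2, hemp]
      simp
    have hkeys : (PySem.Dict.empty.update uD.items).keys = e.map (·.1) := by
      simp only [PySem.Dict.keys, hmi, huK, heUe]
    have hknd : (PySem.Dict.empty.update uD.items).keys.Nodup := hkeys ▸ hnde
    have hsorted : PySem.List.sorted (PySem.Dict.empty.update uD.items).keys (fun k => k)
        = e.map (·.1) :=
      PySem.List.sorted_eq_of_perm_of_pairwise_lt _ _ _ (hkeys ▸ List.Perm.refl _) hplt
    rw [hsorted, List.map_map]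
    apply List.map_congr_left
    intro p hp
    have hU := hall p hp
    have hmem : (p.1, "near") ∈ (PySem.Dict.empty.update uD.items).items := by
      rw [hmi, hu, heUe]
      exact List.mem_map.mpr ⟨p, hp, rfl⟩
    have hgd := PySem.Dict.getD_of_mem_items _ hmem hknd ""
    simp [Function.comp, hgd, hU]
  · -- at least one non-U turn
    have hm0 : 0 < e2.length := List.length_pos_iff.mpr hm
    rw [if_pos (by simpa using hm0)]
    set m := e2.length with hmdef
    have htp0 : PySem.List.pySetD (List.replicate m "far") 0 "near"
        = (List.replicate m "far").set 0 "near" := by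
      simp [PySem.List.pySetD, PySem.List.pySet?, PySem.List.pyIdx?, hm0]
    have hlen1 : ((List.replicate m "far").set 0 "near").length = m := by simp
    have htpn : PySem.List.pySetD ((List.replicate m "far").set 0 "near") (-1) "near"
        = ((List.replicate m "far").set 0 "near").set (m - 1) "near" := by
      rw [pySetD_neg_one _ _ (by rw [← List.length_pos_iff] at *; omega), hlen1]
    rw [htp0, htpn]
    set tp2 := ((List.replicate m "far").set 0 "near").set (m - 1) "near" with htp2def
    have hlen2 : tp2.length = m := by simp [htp2def]
    have htp2 : ∀ (k : Nat) (hk : k < m), tp2[k]'(by omega) =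
        if k = 0 ∨ k = m - 1 then "near" else "far" := by
      intro k hk
      simp only [htp2def, List.getElem_set, List.getElem_replicate]
      by_cases h1 : m - 1 = k <;> by_cases h2 : (0:Nat) = k <;>
        simp [h1, h2] <;> omega
    set zl := (e2.zip tp2).map (fun q => (q.1.1, q.2)) with hzldef
    have hzlen : zl.length = m := by simp [hzldef, hlen2]; omega
    have hzl : ∀ (k : Nat) (hk : k < m), zl[k]'(by omega) =
        ((e2[k]'(by omega)).1, if k = 0 ∨ k = m - 1 then "near" else "far") := by
      intro k hk
      simp only [hzldef, List.getElem_map, List.getElem_zip, htp2 k hk]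
    have hzlfst : zl.map (·.1) = e2.map (·.1) := by
      have h := List.map_fst_zip (l₁ := e2) (l₂ := tp2) (le_of_eq (hlen2.trans hmdef).symm)
      calc zl.map (·.1) = (e2.zip tp2).map (fun q => q.1.1) := by
            rw [hzldef, List.map_map]; try rfl
        _ = ((e2.zip tp2).map Prod.fst).map (·.1) := by rw [List.map_map]; try rfl
        _ = e2.map (·.1) := by rw [h]
    have hep : (PySem.Dict.ofList zl).items = zl := by
      have h2 := PySem.Dict.items_foldl_insert_fresh zl (fun p => p.1) (fun p => p.2)
        PySem.Dict.empty (fun a _ => PySem.Dict.contains_empty a.1) (hzlfst ▸ hnd2)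
      simp only [] at h2
      rw [PySem.Dict.ofList, PySem.Dict.update, h2, hemp]
      simp
    have hepK : (PySem.Dict.ofList zl).keys = e2.map (·.1) := by
      simp only [PySem.Dict.keys, hep, hzlfst]
    have hfresh2 : ∀ a ∈ uD.items, (PySem.Dict.ofList zl).contains a.1 = false := by
      intro a ha
      rw [PySem.Dict.contains_eq_decide_mem_keys, hepK]
      simp only [decide_eq_false_iff_not, List.mem_map]
      rintro ⟨q, hq, hq1⟩
      exact hfreshU a ha q hq hq1
    have h2 := PySem.Dict.items_foldl_insert_fresh uD.items (fun p => p.1) (fun p => p.2)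
      (PySem.Dict.ofList zl) hfresh2 (huK ▸ hndU)
    simp only [] at h2
    have hmi : ((PySem.Dict.ofList zl).update uD.items).items = zl ++ uD.items := by
      rw [PySem.Dict.update, h2, hep]
      simp
    have hkeys : ((PySem.Dict.ofList zl).update uD.items).keys
        = e2.map (·.1) ++ eU.map (·.1) := by
      simp only [PySem.Dict.keys, hmi, List.map_append, hzlfst, huK]
    have hperm : (e.map (·.1)).Perm ((PySem.Dict.ofList zl).update uD.items).keys := by
      rw [hkeys, he2, heU]
      have h1 := List.filter_append_perm (fun p : Int × String => p.2 == "U") e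
      have h3 : ((e.filter (fun p => p.2 != "U")) ++ e.filter (fun p => p.2 == "U")).Perm e := by
        refine List.Perm.trans List.perm_append_comm ?_
        have heq : (fun p : Int × String => p.2 != "U")
            = fun p => !(p.2 == "U") := by funext p; simp [bne]
        rw [heq]; exact h1
      have h4 := (h3.map (·.1)).symm
      rw [List.map_append] at h4
      exact h4
    have hknd : ((PySem.Dict.ofList zl).update uD.items).keys.Nodup := hperm.nodup hnde
    have hsorted : PySem.List.sorted ((PySem.Dict.ofList zl).update uD.items).keys (fun k => k)
        = e.map (·.1) :=
      PySem.List.sorted_eq_of_perm_of_pairwise_lt _ _ _ hperm hplt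
    rw [hsorted, List.map_map]
    have hhead : e2.head? = some (e2[0]'(by omega)) := by
      rw [List.head?_eq_getElem?, List.getElem?_eq_getElem (by omega)]
    have hlast : e2.getLast? = some (e2[m-1]'(by omega)) := by
      rw [List.getLast?_eq_getElem?]
      exact List.getElem?_eq_getElem (by omega)
    rw [hhead, hlast]
    apply List.map_congr_left
    intro p hp
    by_cases hU : (p.2 == "U") = true
    · have hmem : (p.1, "near") ∈ ((PySem.Dict.ofList zl).update uD.items).items := by
        rw [hmi, hu]
        exact List.mem_append_right _
          (List.mem_map.mpr ⟨p, List.mem_filter.mpr ⟨hp, hU⟩, rfl⟩)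
      have hgd := PySem.Dict.getD_of_mem_items _ hmem hknd ""
      simp [Function.comp, hgd, hU]
    · have hufalse : (p.2 == "U") = false := by
        revert hU; cases (p.2 == "U") <;> simp
      have hp2' : p ∈ e2 := by
        rw [he2]
        exact List.mem_filter.mpr ⟨hp, by simp [bne, hufalse]⟩
      obtain ⟨k, hk, hpk⟩ := List.getElem_of_mem hp2'
      have hkm : k < m := by omega
      have hmem : (p.1, if k = 0 ∨ k = m - 1 then "near" else "far")
          ∈ ((PySem.Dict.ofList zl).update uD.items).items := by
        rw [hmi]
        refine List.mem_append_left _ ?_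
        have hzk := hzl k hkm
        rw [hpk] at hzk
        have hmem0 : zl[k]'(by omega) ∈ zl := List.getElem_mem _
        rw [hzk] at hmem0
        exact hmem0
      have hgd := PySem.Dict.getD_of_mem_items _ hmem hknd ""
      have hinj : ∀ (j : Nat) (hj : j < m), (e2[j]'(by omega)).1 = p.1 → j = k := by
        intro j hj hjp
        by_contra hne
        rcases Nat.lt_or_ge j k with hlt | hge
        · have hh := (List.pairwise_iff_getElem.mp hp2) j k (by omega) (by omega) hlt
          rw [hpk] at hh; omega
        · have hkj : k < j := by omega
          have hh := (List.pairwise_iff_getElem.mp hp2) k j (by omega) (by omega) hkj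
          rw [hpk] at hh; omega
      simp only [Function.comp, hgd, hufalse, Bool.false_or]
      by_cases hk0 : k = 0
      · have h0 : (e2[0]'(by omega)).1 = p.1 := by
          subst hk0; rw [hpk]
        simp [h0, hk0]
      · have h0 : ¬ ((e2[0]'(by omega)).1 = p.1) := fun h => hk0 ((hinj 0 (by omega) h).symm)
        by_cases hkm1 : k = m - 1
        · have h1 : (e2[m-1]'(by omega)).1 = p.1 := by
            subst hkm1; rw [hpk]
          simp [h1, hkm1]
        · have h1 : ¬ ((e2[m-1]'(by omega)).1 = p.1) :=
            fun h => hkm1 ((hinj (m-1) (by omega) h).symm)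
          simp [h0, h1, hk0, hkm1]

-- ===== VERDICT (by name: the statement is the Claim_ definition above) =====
theorem classify_turn_proximity_spec : Claim_equal_classify_turn_proximity := by
  intro l _
  unfold Spec_classify_turn_proximity classify_turn_proximity classify_turn_proximity_alt
  exact classify_core (PySem.List.enumerate l 0) (PySem.List.pairwise_lt_enumerate l 0)
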